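-- pv_equiv track=rewrite | github.com/sdtblck/lm_dataloader | lm_dataloader/lm_dataset.py | _num_epochs
-- ===== SOURCE A (Python) =====
-- def _num_epochs(tokens_per_epoch, seq_length, num_samples):
--     """Based on number of samples and sequence lenght, calculate how many
--     epochs will be needed."""
--     num_epochs = 0
--     total_tokens = 0
--     assert tokens_per_epoch > 0
--     while True:
--         num_epochs += 1
--         total_tokens += tokens_per_epoch
--         # -1 is because we need to retrieve seq_length + 1 token each time
--         # but the last token will overlap with the first token of the next
--         # sample except for the last sample.
--         if ((total_tokens - 1) // seq_length) >= num_samples: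
--             return num_epochs
-- ===== SOURCE B (Python) =====
-- def _num_epochs(tokens_per_epoch, seq_length, num_samples):
--     """Based on number of samples and sequence lenght, calculate how many
--     epochs will be needed."""
--     assert tokens_per_epoch > 0
--     # smallest k >= 1 with (k*tokens_per_epoch - 1) // seq_length >= num_samples,
--     # i.e. k*tokens_per_epoch >= num_samples*seq_length + 1, by ceiling division.
--     need = num_samples * seq_length + 1
--     return max(1, -(-need // tokens_per_epoch))
-- ===== Notes on version B (the rewrite author's own statement) =====
-- stated objective: faster
-- what changed: Replaces the epoch-counting while-loop with a closed-form ceiling division max(1, ceil((num_samples*seq_length+1)/tokens_per_epoch)); Pre_ excludes nonpositive tokens_per_epoch (A asserts) and nonpositive seq_length, where A raises ZeroDivisionError, diverges, or accidentally returns 1 after one iteration because the floored quotient only shrinks.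
-- outside the precondition, e.g. on _num_epochs(5, 0, 2): A raises ZeroDivisionError, B returns 1; on _num_epochs(5, -3, 7): A does not finish within the time limit, B returns 1; on _num_epochs(5, -3, -10): A returns 1, B returns 7
import Mathlib
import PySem

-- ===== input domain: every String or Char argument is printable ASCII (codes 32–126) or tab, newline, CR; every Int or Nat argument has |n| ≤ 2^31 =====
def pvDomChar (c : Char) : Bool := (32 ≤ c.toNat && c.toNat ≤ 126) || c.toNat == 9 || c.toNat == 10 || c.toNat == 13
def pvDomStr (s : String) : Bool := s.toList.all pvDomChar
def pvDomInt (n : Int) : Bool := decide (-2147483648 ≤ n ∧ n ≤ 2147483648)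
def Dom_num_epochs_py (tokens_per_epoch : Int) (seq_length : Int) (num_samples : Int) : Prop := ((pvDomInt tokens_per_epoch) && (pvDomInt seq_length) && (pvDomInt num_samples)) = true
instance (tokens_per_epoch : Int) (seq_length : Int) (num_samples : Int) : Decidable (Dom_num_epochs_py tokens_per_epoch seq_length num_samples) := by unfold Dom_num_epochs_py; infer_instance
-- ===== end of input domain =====

-- B replaces A's epoch-counting while-loop by a closed-form ceiling division (O(1) vs O(answer)).


-- ===== PORT A =====
-- the `while True` loop, with fuel only to make it total (inside Pre_ the fuel is never exhausted:
-- the loop returns after at most max(1, num_samples*seq_length+1) ≤ 2^62+1 < 2^63 iterations)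
def numEpochsLoopA (tokens_per_epoch seq_length num_samples : Int) :
    Nat → Int → Int → Int
  | 0, num_epochs, _ => num_epochs               -- fuel exhausted; unreachable under Pre_
  | fuel + 1, num_epochs, total_tokens =>
      let num_epochs := num_epochs + 1
      let total_tokens := total_tokens + tokens_per_epoch
      if num_samples ≤ PySem.Int.floordiv (total_tokens - 1) seq_length then
        num_epochs
      else
        numEpochsLoopA tokens_per_epoch seq_length num_samples fuel num_epochs total_tokens

def num_epochs_py (tokens_per_epoch : Int) (seq_length : Int) (num_samples : Int) : Int :=
  numEpochsLoopA tokens_per_epoch seq_length num_samples 9223372036854775808 0 0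

-- ===== PORT B =====
def num_epochs_py_alt (tokens_per_epoch : Int) (seq_length : Int) (num_samples : Int) : Int :=
  let need := num_samples * seq_length + 1
  max 1 (-(PySem.Int.floordiv (-need) tokens_per_epoch))

-- ===== PRECONDITION & SPEC =====
-- Pre_ excludes nonpositive tokens_per_epoch (A's assert fails) and nonpositive seq_length, where A
-- raises ZeroDivisionError (seq_length = 0) or, since the floored quotient only shrinks, either
-- diverges or accidentally returns 1 after a single iteration (seq_length < 0).
def Pre_num_epochs_py (tokens_per_epoch : Int) (seq_length : Int) (num_samples : Int) : Prop :=
  0 < tokens_per_epoch ∧ 0 < seq_length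
instance (tokens_per_epoch : Int) (seq_length : Int) (num_samples : Int) : Decidable (Pre_num_epochs_py tokens_per_epoch seq_length num_samples) := by unfold Pre_num_epochs_py; infer_instance

def pvWitness_num_epochs_py : Int × Int × Int := (3, 2, 5)

def Spec_num_epochs_py (tokens_per_epoch : Int) (seq_length : Int) (num_samples : Int) (out : Int) : Prop := out = num_epochs_py_alt tokens_per_epoch seq_length num_samples
instance (tokens_per_epoch : Int) (seq_length : Int) (num_samples : Int) (out : Int) : Decidable (Spec_num_epochs_py tokens_per_epoch seq_length num_samples out) := by unfold Spec_num_epochs_py; infer_instance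

-- ===== CLAIM (what is proved, stated in full; the proofs are below) =====
def Claim_equal_num_epochs_py : Prop := ∀ (tokens_per_epoch : Int) (seq_length : Int) (num_samples : Int), Dom_num_epochs_py tokens_per_epoch seq_length num_samples → Pre_num_epochs_py tokens_per_epoch seq_length num_samples → Spec_num_epochs_py tokens_per_epoch seq_length num_samples (num_epochs_py tokens_per_epoch seq_length num_samples)

-- ===== LEMMAS AND PROOFS =====

-- For 0 < t: k*t ≥ n*s+1 ↔ k ≥ ceil((n*s+1)/t) = -((-(n*s+1)) fdiv t).
theorem ceil_le_iff (t x k : Int) (ht : 0 < t) :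
    -(PySem.Int.floordiv (-x) t) ≤ k ↔ x ≤ k * t := by
  rw [neg_le, PySem.Int.le_floordiv_iff_mul_le ht]
  constructor <;> intro h <;> linarith

-- The loop condition after the (m+1)-st increment holds iff m+1 has reached B's closed form.
theorem cond_iff (t s n m : Int) (ht : 0 < t) (hs : 0 < s) (hm : 0 ≤ m) :
    (n ≤ PySem.Int.floordiv ((m + 1) * t - 1) s ↔ num_epochs_py_alt t s n ≤ m + 1) := by
  rw [PySem.Int.le_floordiv_iff_mul_le hs]
  unfold num_epochs_py_alt
  simp only [max_le_iff]
  have h := ceil_le_iff t (n * s + 1) (m + 1) ht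
  constructor <;> intro hh
  · exact ⟨by omega, h.mpr (by linarith)⟩
  · have := h.mp hh.2
    linarith

-- Loop invariant: starting at epoch count m (with total_tokens = m*t), not yet done, and with
-- enough fuel, the loop returns exactly B's closed form K.
theorem loop_eq (t s n : Int) (ht : 0 < t) (hs : 0 < s) :
    ∀ (fuel : Nat) (m : Int), 0 ≤ m → m < num_epochs_py_alt t s n →
      (num_epochs_py_alt t s n - m).toNat ≤ fuel →
      numEpochsLoopA t s n fuel m (m * t) = num_epochs_py_alt t s n := by
  intro fuel
  induction fuel with
  | zero => intro m h0 hlt hf; omega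
  | succ f ih =>
      intro m h0 hlt hf
      unfold numEpochsLoopA
      simp only
      have hc := cond_iff t s n m ht hs h0
      by_cases hdone : num_epochs_py_alt t s n ≤ m + 1
      · rw [if_pos (by rw [show m * t + t - 1 = (m + 1) * t - 1 by ring]; exact hc.mpr hdone)]
        omega
      · rw [if_neg (by rw [show m * t + t - 1 = (m + 1) * t - 1 by ring]
                       exact fun h => hdone (hc.mp h))]
        have := ih (m + 1) (by omega) (by omega) (by omega)
        rw [show (m + 1) * t = m * t + t by ring] at this
        exact this

-- Under Dom, K = max 1 (ceil((n*s+1)/t)) is at most 2^62 + 1 < 2^63 = the fuel.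
theorem alt_small (t s n : Int) (ht : 0 < t)
    (hs : -2147483648 ≤ s ∧ s ≤ 2147483648) (hn : -2147483648 ≤ n ∧ n ≤ 2147483648) :
    num_epochs_py_alt t s n ≤ 4611686018427387905 := by
  unfold num_epochs_py_alt
  have hb : n * s ≤ 2147483648 * 2147483648 := by
    calc n * s ≤ |n * s| := le_abs_self _
    _ = |n| * |s| := abs_mul n s
    _ ≤ 2147483648 * 2147483648 := by
          apply mul_le_mul (by rw [abs_le]; omega) (by rw [abs_le]; omega) (abs_nonneg s) (by norm_num)
  have h := (ceil_le_iff t (n * s + 1) 4611686018427387905 ht).mpr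
    (by nlinarith)
  simp only
  omega

-- ===== VERDICT (by name: the statement is the Claim_ definition above) =====
theorem num_epochs_py_spec : Claim_equal_num_epochs_py := by
  intro t s n hdom hpre
  obtain ⟨ht, hs⟩ := hpre
  unfold Spec_num_epochs_py num_epochs_py
  have hdom' : (pvDomInt s = true ∧ pvDomInt n = true) := by
    unfold Dom_num_epochs_py at hdom
    simp only [Bool.and_eq_true] at hdom
    exact ⟨hdom.1.2, hdom.2⟩
  have hsb : -2147483648 ≤ s ∧ s ≤ 2147483648 := by
    have := hdom'.1; unfold pvDomInt at this; simpa using this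
  have hnb : -2147483648 ≤ n ∧ n ≤ 2147483648 := by
    have := hdom'.2; unfold pvDomInt at this; simpa using this
  have h1 : (1 : Int) ≤ num_epochs_py_alt t s n := le_max_left _ _
  have hsmall := alt_small t s n ht hsb hnb
  have := loop_eq t s n ht hs 9223372036854775808 0 le_rfl (by omega) (by omega)
  simpa using this
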